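-- pv_equiv track=rewrite | github.com/xujian519/athena-platform | scripts/upgrade_prompt_syntax.py | _is_inside_json_codeblock
-- ===== SOURCE A (Python) =====
-- from typing import Sequence
--
-- def _is_inside_json_codeblock(lines: Sequence[str], idx: int) -> bool:
--     """判断当前行是否位于 ```json 代码块内部。"""
--     in_json_block = False
--     for i, line in enumerate(lines):
--         stripped = line.strip()
--         if stripped.startswith("```json") or stripped.startswith("``` json"):
--             in_json_block = True
--         elif stripped == "```" and in_json_block:
--             in_json_block = False
--         if i == idx:
--             return in_json_block
--     return False
-- ===== SOURCE B (Python) =====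
-- def _is_inside_json_codeblock(lines, idx):
--     if idx < 0 or idx >= len(lines):
--         return False
--     for i in range(idx, -1, -1):
--         s = lines[i].strip()
--         if s.startswith("```json") or s.startswith("``` json"):
--             return True
--         if s == "```":
--             return False
--     return False
-- ===== Notes on version B (the rewrite author's own statement) =====
-- stated objective: alternative
-- what changed: Replaces the forward whole-list state-machine scan with a backward scan from idx: the nearest fence line at or before idx decides membership (json opener means inside, plain ``` means outside), so no in-block state is carried.
import Mathlib
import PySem

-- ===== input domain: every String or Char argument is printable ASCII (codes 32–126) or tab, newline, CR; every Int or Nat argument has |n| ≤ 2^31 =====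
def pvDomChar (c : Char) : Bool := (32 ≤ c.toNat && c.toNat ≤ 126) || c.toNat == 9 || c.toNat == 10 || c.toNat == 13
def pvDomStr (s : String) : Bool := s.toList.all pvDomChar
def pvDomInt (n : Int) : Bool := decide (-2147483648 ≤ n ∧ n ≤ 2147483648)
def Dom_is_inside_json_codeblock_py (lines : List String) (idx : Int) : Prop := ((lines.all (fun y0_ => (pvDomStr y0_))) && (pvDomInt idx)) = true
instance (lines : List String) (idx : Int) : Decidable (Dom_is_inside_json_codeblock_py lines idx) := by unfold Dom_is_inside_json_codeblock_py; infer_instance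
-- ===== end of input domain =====

-- B replaces A's forward whole-list state machine by a backward scan from idx
-- (nearest fence at or before idx decides); return values proved equal on all inputs.

-- ===== PORT A =====
-- A's loop: enumerate(lines), maintain in_json_block, return the state when i == idx.
def pvALoop (ls : List String) (idx : Int) (i : Nat) (inb : Bool) : Bool :=
  match ls with
  | [] => false
  | l :: rest =>
    let stripped := PySem.Str.strip l
    let inb' :=
      if PySem.Str.startswith stripped "```json" || PySem.Str.startswith stripped "``` json" then
        true
      else if stripped = "```" && inb then
        false
      else inb
    if (i : Int) = idx then inb' else pvALoop rest idx (i + 1) inb'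

def is_inside_json_codeblock_py (lines : List String) (idx : Int) : Bool :=
  pvALoop lines idx 0 false

-- ===== PORT B =====
-- B's loop: scan lines[idx], lines[idx-1], …, lines[0]; first json opener → true,
-- first plain "```" → false. Ported as recursion over the reversed prefix.
def pvBScan (ls : List String) : Bool :=
  match ls with
  | [] => false
  | l :: rest =>
    let s := PySem.Str.strip l
    if PySem.Str.startswith s "```json" || PySem.Str.startswith s "``` json" then true
    else if s = "```" then false
    else pvBScan rest

def is_inside_json_codeblock_py_alt (lines : List String) (idx : Int) : Bool :=
  if idx < 0 || (lines.length : Int) ≤ idx then false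
  else pvBScan ((lines.take (idx.toNat + 1)).reverse)

-- ===== PRECONDITION & SPEC =====
def Spec_is_inside_json_codeblock_py (lines : List String) (idx : Int) (out : Bool) : Prop := out = is_inside_json_codeblock_py_alt lines idx
instance (lines : List String) (idx : Int) (out : Bool) : Decidable (Spec_is_inside_json_codeblock_py lines idx out) := by unfold Spec_is_inside_json_codeblock_py; infer_instance

-- ===== CLAIM (what is proved, stated in full; the proofs are below) =====
def Claim_equal_is_inside_json_codeblock_py : Prop := ∀ (lines : List String) (idx : Int), Dom_is_inside_json_codeblock_py lines idx → Spec_is_inside_json_codeblock_py lines idx (is_inside_json_codeblock_py lines idx)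

-- ===== LEMMAS AND PROOFS =====

-- the state-transition of A's loop body; note it does not depend on the old state
-- when the line is a fence, which is why the backward scan is correct.
def pvStep (l : String) (b : Bool) : Bool :=
  let s := PySem.Str.strip l
  if PySem.Str.startswith s "```json" || PySem.Str.startswith s "``` json" then true
  else if s = "```" then false
  else b

-- forward fold of pvStep (the state A's loop carries)
def pvFwd (ls : List String) (b : Bool) : Bool := ls.foldl (fun acc l => pvStep l acc) b

theorem pvStep_eq (l : String) (b : Bool) :
    (if PySem.Str.startswith (PySem.Str.strip l) "```json"
        || PySem.Str.startswith (PySem.Str.strip l) "``` json" then true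
     else if PySem.Str.strip l = "```" && b then false else b) = pvStep l b := by
  unfold pvStep
  cases b <;> by_cases h2 : PySem.Str.strip l = "```" <;> simp [h2]

theorem pvFwd_append (p : List String) (l : String) (b : Bool) :
    pvFwd (p ++ [l]) b = pvStep l (pvFwd p b) := by
  simp [pvFwd, List.foldl_append]

theorem pvBScan_reverse (p : List String) : pvBScan p.reverse = pvFwd p false := by
  induction p using List.reverseRecOn with
  | nil => simp [pvBScan, pvFwd]
  | append_singleton q l ih =>
    rw [pvFwd_append, List.reverse_append]
    simp only [List.reverse_singleton, List.singleton_append]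
    simp only [pvBScan, pvStep, ih]

theorem pvALoop_eq (ls : List String) (idx : Int) :
    ∀ (i : Nat) (b : Bool), pvALoop ls idx i b =
      if (i : Int) ≤ idx ∧ idx < (i : Int) + ls.length then
        pvFwd (ls.take ((idx - i).toNat + 1)) b
      else false := by
  induction ls with
  | nil =>
    intro i b
    simp [pvALoop]
  | cons l rest ih =>
    intro i b
    show (if (i : Int) = idx then _ else pvALoop rest idx (i + 1) _) = _
    rw [pvStep_eq]
    by_cases hi : (i : Int) = idx
    · have h : (i : Int) ≤ idx ∧ idx < (i : Int) + (l :: rest).length := by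
        simp; omega
      rw [if_pos hi, if_pos h]
      have : (idx - i).toNat = 0 := by omega
      simp [this, pvFwd]
    · rw [if_neg hi, ih]
      by_cases hc : ((i : Int) + 1) ≤ idx ∧ idx < ((i : Int) + 1) + rest.length
      · have hc' : (i : Int) ≤ idx ∧ idx < (i : Int) + (l :: rest).length := by
          simp at hc ⊢; omega
        rw [if_pos _, if_pos hc']
        · have ht : (idx - i).toNat + 1 = ((idx - (i + 1)).toNat + 1) + 1 := by omega
          rw [ht]
          simp [List.take_succ_cons, pvFwd]
        · exact_mod_cast hc
      · have hc' : ¬ ((i : Int) ≤ idx ∧ idx < (i : Int) + (l :: rest).length) := by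
          simp at hc ⊢; omega
        rw [if_neg _, if_neg hc']
        exact_mod_cast hc

-- ===== VERDICT (by name: the statement is the Claim_ definition above) =====
theorem is_inside_json_codeblock_py_spec : Claim_equal_is_inside_json_codeblock_py := by
  intro lines idx _
  unfold Spec_is_inside_json_codeblock_py is_inside_json_codeblock_py
    is_inside_json_codeblock_py_alt
  rw [pvALoop_eq, pvBScan_reverse]
  simp only [Nat.cast_zero, zero_add, Int.sub_zero]
  by_cases h : 0 ≤ idx ∧ idx < (lines.length : Int)
  · rw [if_pos h, if_neg (by simp only [Bool.or_eq_true, decide_eq_true_eq]; omega)]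
  · rw [if_neg h, if_pos (by simp only [Bool.or_eq_true, decide_eq_true_eq]; omega)]
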